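-- pv_equiv track=rewrite | github.com/proman3419/AGH-WIET-INF-ASD-2021 | others/bit_algo_start_4/width_of_string.py | find_width_of_string
-- ===== SOURCE A (Python) =====
-- def bin_search_string(S, s):
--   n = len(S)
--   l = 0
--   r = n - 1
--   while l <= r:
--     c = (l+r)//2
--     if S[c] < s:
--       l = c + 1
--     elif S[c] > s:
--       r = c - 1
--     else:
--       while c > 0 and S[c-1] == s:
--         c -= 1
--       break
--
--   if S[c] != s:
--     return None
--   return c
--
-- def find_width_of_string(S, t):
--   n, m = len(t), len(S)
--   S.sort()
--   F = [[-1 for _ in range(n)] for _ in range(n)] # maksymalna szerokosc reprezentacji dla napisu t[i..j], -1 gdy sie nie da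
--
--   for l in range(1, n+1):
--     for i in range(n-l+1):
--       j = i + l - 1
--
--       s_i = bin_search_string(S, t[i:j+1])
--       if s_i is not None:
--         F[i][j] = max(F[i][j], len(S[s_i]))
--
--       for k in range(i+1, j-1):
--         F[i][j] = max(F[i][j], min(F[i][k], F[k+1][j]))
--
--   return F[0][-1]
-- ===== SOURCE B (Python) =====
-- def find_width_of_string(S, t):
--   n = len(t)
--   S.sort()
--   words = set(S)
--   memo = {}
--
--   def solve(i, j):
--     if (i, j) in memo:
--       return memo[(i, j)]
--     sub = t[i:j+1]
--     best = len(sub) if sub in words else -1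
--     for k in range(i+1, j-1):
--       best = max(best, min(solve(i, k), solve(k+1, j)))
--     memo[(i, j)] = best
--     return best
--
--   return solve(0, n - 1)
-- ===== Notes on version B (the rewrite author's own statement) =====
-- stated objective: alternative
-- what changed: Replaces the bottom-up length-by-length DP table with hand-rolled binary search per interval by a top-down memoized recursion whose base case tests the interval substring against a hash set built once; both still sort S in place.
import Mathlib
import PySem

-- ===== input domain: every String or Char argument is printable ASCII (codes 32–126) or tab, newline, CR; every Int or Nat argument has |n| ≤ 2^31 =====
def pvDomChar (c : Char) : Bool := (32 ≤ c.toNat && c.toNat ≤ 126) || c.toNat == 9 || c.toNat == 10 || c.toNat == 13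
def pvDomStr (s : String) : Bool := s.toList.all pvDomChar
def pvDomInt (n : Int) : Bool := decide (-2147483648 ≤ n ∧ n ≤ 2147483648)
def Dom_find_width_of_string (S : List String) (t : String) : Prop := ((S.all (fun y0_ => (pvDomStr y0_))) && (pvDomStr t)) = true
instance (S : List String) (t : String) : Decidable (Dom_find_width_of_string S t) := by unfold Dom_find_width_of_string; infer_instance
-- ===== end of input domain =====

-- B replaces the bottom-up DP table + per-interval binary search by a top-down memoized
-- recursion testing interval substrings against a set built once (alternative decomposition,
-- same asymptotics); both A and B sort S in place (equivalence proved for the return value,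
-- with the same mutation performed by both).

-- ===== PORT A =====

-- inner 'while c > 0 and S[c-1] == s: c -= 1' of bin_search_string
def pvSkipLeft (S : List String) (s : String) (c : Int) : Int :=
  if h : 0 < c ∧ PySem.List.pyGetD S (c - 1) "" = s then pvSkipLeft S s (c - 1) else c
termination_by c.toNat
decreasing_by omega

-- outer 'while l <= r' loop of bin_search_string; cur is the current value of the
-- variable c (none = not yet bound; Python raises UnboundLocalError after the loop then)
def pvBsLoop (S : List String) (s : String) (l r : Int) (cur : Option Int) : Option Int :=
  if h : l ≤ r then
    let c := PySem.Int.floordiv (l + r) 2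
    let Sc := PySem.List.pyGetD S c ""
    if Sc < s then pvBsLoop S s (c + 1) r (some c)
    else if s < Sc then pvBsLoop S s l (c - 1) (some c)
    else some (pvSkipLeft S s c)
  else cur
termination_by (r - l + 1).toNat
decreasing_by
  · have := PySem.Int.floordiv_two_mid_bounds h; omega
  · have := PySem.Int.floordiv_two_mid_bounds h; omega

def bin_search_string (S : List String) (s : String) : Option Int :=
  let n := PySem.List.len S
  match pvBsLoop S s 0 (n - 1) none with
  | none => none  -- only for S = []: Python raises UnboundLocalError at 'S[c]' (excluded by Pre_)
  | some c => if PySem.List.pyGetD S c "" ≠ s then none else some c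

-- F[i][j] read / write (indices always in range under Pre_; defaults are never used there)
def pvGet2 (F : List (List Int)) (i j : Int) : Int :=
  PySem.List.pyGetD (PySem.List.pyGetD F i []) j (-1)

def pvSet2 (F : List (List Int)) (i j : Int) (v : Int) : List (List Int) :=
  PySem.List.pySetD F i (PySem.List.pySetD (PySem.List.pyGetD F i []) j v)

def find_width_of_string (S : List String) (t : String) : Int :=
  let n := PySem.Str.len t
  let _m := PySem.List.len S
  let Ss := PySem.List.sorted S (fun x => x) false
  let F0 : List (List Int) :=
    (PySem.List.pyRange 0 n 1).map (fun _ => (PySem.List.pyRange 0 n 1).map (fun _ => (-1 : Int)))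
  let F := (PySem.List.pyRange 1 (n + 1) 1).foldl (fun F l =>
      (PySem.List.pyRange 0 (n - l + 1) 1).foldl (fun F i =>
        let j := i + l - 1
        let F1 := match bin_search_string Ss (PySem.Str.slice t (some i) (some (j + 1))) with
          | some s_i =>
              pvSet2 F i j (max (pvGet2 F i j) (PySem.Str.len (PySem.List.pyGetD Ss s_i "")))
          | none => F
        (PySem.List.pyRange (i + 1) (j - 1) 1).foldl (fun F k =>
          pvSet2 F i j (max (pvGet2 F i j) (min (pvGet2 F i k) (pvGet2 F (k + 1) j)))) F1) F) F0
  PySem.List.pyGetD (PySem.List.pyGetD F 0 []) (-1) 0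

-- ===== PORT B =====

-- memoized solve(i, j); fuel is a totality guard only (one unit per nesting level;
-- find_width_of_string_alt passes more than the recursion can ever use)
def pvSolve (t : String) (words : PySem.Set String) (fuel : Nat) (i j : Int)
    (memo : PySem.Dict (Int × Int) Int) : Int × PySem.Dict (Int × Int) Int :=
  match fuel with
  | 0 => (-1, memo)
  | fuel + 1 =>
    match memo.get? (i, j) with
    | some v => (v, memo)
    | none =>
      let sub := PySem.Str.slice t (some i) (some (j + 1))
      let best0 : Int := if PySem.Set.contains words sub then PySem.Str.len sub else -1
      let p := (PySem.List.pyRange (i + 1) (j - 1) 1).foldl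
        (fun (p : Int × PySem.Dict (Int × Int) Int) k =>
          let q1 := pvSolve t words fuel i k p.2
          let q2 := pvSolve t words fuel (k + 1) j q1.2
          (max p.1 (min q1.1 q2.1), q2.2)) (best0, memo)
      (p.1, p.2.insert (i, j) p.1)

def find_width_of_string_alt (S : List String) (t : String) : Int :=
  let n := PySem.Str.len t
  let Ss := PySem.List.sorted S (fun x => x) false
  let words := PySem.Set.ofList Ss
  (pvSolve t words (n.toNat + 1) 0 (n - 1) PySem.Dict.empty).1

-- ===== PRECONDITION & SPEC =====
-- Pre_ excludes exactly the inputs on which A raises: S = [] (UnboundLocalError in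
-- bin_search_string) and t = "" (IndexError at F[0][-1] on the empty table).
def Pre_find_width_of_string (S : List String) (t : String) : Prop := S ≠ [] ∧ t ≠ ""
instance (S : List String) (t : String) : Decidable (Pre_find_width_of_string S t) := by
  unfold Pre_find_width_of_string; infer_instance

def pvWitness_find_width_of_string : List String × String := (["ab", "a"], "ab")

def Spec_find_width_of_string (S : List String) (t : String) (out : Int) : Prop :=
  out = find_width_of_string_alt S t
instance (S : List String) (t : String) (out : Int) : Decidable (Spec_find_width_of_string S t out) := by
  unfold Spec_find_width_of_string; infer_instance

-- ===== CLAIM (what is proved, stated in full; the proofs are below) =====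
def Claim_equal_find_width_of_string : Prop := ∀ (S : List String) (t : String),
  Dom_find_width_of_string S t → Pre_find_width_of_string S t →
  Spec_find_width_of_string S t (find_width_of_string S t)

-- ===== LEMMAS AND PROOFS =====

-- common value of both programs: the interval-DP recurrence (M = membership list)
def pvW (M : List String) (t : String) (i j : Int) : Int :=
  let sub := PySem.Str.slice t (some i) (some (j + 1))
  let base : Int := if sub ∈ M then PySem.Str.len sub else -1
  (PySem.List.pyRange (i + 1) (j - 1) 1).attach.foldl
    (fun a k => max a (min (pvW M t i k.1) (pvW M t (k.1 + 1) j))) base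
termination_by (j - i).toNat
decreasing_by
  · have := (PySem.List.mem_pyRange_one).mp k.2; omega
  · have := (PySem.List.mem_pyRange_one).mp k.2; omega

theorem pvW_eq (M : List String) (t : String) (i j : Int) :
    pvW M t i j = (PySem.List.pyRange (i + 1) (j - 1) 1).foldl
      (fun a k => max a (min (pvW M t i k) (pvW M t (k + 1) j)))
      (if PySem.Str.slice t (some i) (some (j + 1)) ∈ M then
        PySem.Str.len (PySem.Str.slice t (some i) (some (j + 1))) else -1) := by
  rw [pvW]
  exact List.foldl_attach (f := fun a k => max a (min (pvW M t i k) (pvW M t (k + 1) j)))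

theorem pvW_congr (M M' : List String) (h : ∀ x, x ∈ M ↔ x ∈ M') (t : String) (i j : Int) :
    pvW M t i j = pvW M' t i j := by
  rw [pvW_eq, pvW_eq]
  simp only [h]
  apply PySem.List.foldl_congr_mem
  intro acc k hk
  have hb := (PySem.List.mem_pyRange_one).mp hk
  rw [pvW_congr M M' h t i k, pvW_congr M M' h t (k + 1) j]
termination_by (j - i).toNat
decreasing_by
  · omega
  · omega

theorem pvSkipLeft_spec (S : List String) (s : String) (c : Int) (hc : 0 ≤ c)
    (h : PySem.List.pyGetD S c "" = s) :
    0 ≤ pvSkipLeft S s c ∧ pvSkipLeft S s c ≤ c ∧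
      PySem.List.pyGetD S (pvSkipLeft S s c) "" = s := by
  rw [pvSkipLeft]
  split_ifs with hcond
  · have := pvSkipLeft_spec S s (c - 1) (by omega) hcond.2
    exact ⟨this.1, by omega, this.2.2⟩
  · exact ⟨hc, le_refl c, h⟩
termination_by c.toNat
decreasing_by omega

theorem pw_mono {S : List String} (hs : List.Pairwise (· ≤ ·) S) {p q : Nat} (hpq : p ≤ q)
    (hq : q < S.length) : S[p] ≤ S[q] := by
  rcases Nat.lt_or_ge p q with hlt | hge
  · exact List.pairwise_iff_getElem.mp hs p q (by omega) hq hlt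
  · have : p = q := by omega
    subst this; exact le_refl _

theorem pvBsLoop_spec (S : List String) (s : String) (l r : Int) (cur : Option Int)
    (hs : List.Pairwise (· ≤ ·) S) (hl : 0 ≤ l) (hr : r < (S.length : Int))
    (hP : ∀ (idx : Nat) (h : idx < S.length), ((idx : Int) < l ∨ r < (idx : Int)) → S[idx] ≠ s)
    (hc : ∀ c, cur = some c → 0 ≤ c ∧ c < (S.length : Int)) :
    (∀ c, pvBsLoop S s l r cur = some c →
      0 ≤ c ∧ c < (S.length : Int) ∧ (PySem.List.pyGetD S c "" ≠ s → s ∉ S)) ∧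
    (pvBsLoop S s l r cur = none → s ∉ S) := by
  have hnotmem : (∀ (idx : Nat) (h : idx < S.length), S[idx] ≠ s) → s ∉ S := by
    intro hall hmem
    obtain ⟨idx, hidx, he⟩ := List.getElem_of_mem hmem
    exact hall idx hidx he
  rw [pvBsLoop]
  by_cases hlr : l ≤ r
  · rw [dif_pos hlr]
    have hmid := PySem.Int.floordiv_two_mid_bounds hlr
    set c := PySem.Int.floordiv (l + r) 2 with hcdef
    have hc0 : 0 ≤ c := by omega
    have hclen : c < (S.length : Int) := by omega
    have hgetc : PySem.List.pyGetD S c "" = S[c.toNat]'(by omega) :=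
      PySem.List.pyGetD_eq_getElem S "" hc0 hclen
    simp only []
    split_ifs with h1 h2
    · -- S[c] < s : recurse with l := c + 1
      apply pvBsLoop_spec S s (c + 1) r (some c) hs (by omega) hr
      · intro idx hidx hcase
        rcases hcase with hlt | hgt
        · intro heq
          have hmono : S[idx] ≤ S[c.toNat]'(by omega) := pw_mono hs (by omega) (by omega)
          rw [heq, ← hgetc] at hmono
          exact absurd (lt_of_le_of_lt hmono h1) (lt_irrefl s)
        · exact hP idx hidx (Or.inr hgt)
      · intro c0 h0
        cases h0
        exact ⟨hc0, hclen⟩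
    · -- s < S[c] : recurse with r := c - 1
      apply pvBsLoop_spec S s l (c - 1) (some c) hs hl (by omega)
      · intro idx hidx hcase
        rcases hcase with hlt | hgt
        · exact hP idx hidx (Or.inl hlt)
        · intro heq
          have hmono : S[c.toNat]'(by omega) ≤ S[idx] := pw_mono hs (by omega) (by omega)
          rw [heq, ← hgetc] at hmono
          exact absurd (lt_of_lt_of_le h2 hmono) (lt_irrefl s)
      · intro c0 h0
        cases h0
        exact ⟨hc0, hclen⟩
    · -- S[c] = s : break after skipping duplicates left
      have heq : PySem.List.pyGetD S c "" = s := le_antisymm (not_lt.mp h2) (not_lt.mp h1)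
      have hskip := pvSkipLeft_spec S s c hc0 heq
      constructor
      · intro c' hc'
        cases hc'
        exact ⟨hskip.1, by omega, fun hne => absurd hskip.2.2 hne⟩
      · intro hnone
        cases hnone
  · rw [dif_neg hlr]
    have hnot : s ∉ S := by
      apply hnotmem
      intro idx hidx
      exact hP idx hidx (by omega)
    constructor
    · intro c hcur
      have := hc c hcur
      exact ⟨this.1, this.2, fun _ => hnot⟩
    · intro _
      exact hnot
termination_by (r - l + 1).toNat
decreasing_by
  · omega
  · omega

theorem bs_cases (S : List String) (s : String) (hs : List.Pairwise (· ≤ ·) S) (hne : S ≠ []) :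
    (∀ c, bin_search_string S s = some c → s ∈ S ∧ PySem.List.pyGetD S c "" = s) ∧
    (bin_search_string S s = none → s ∉ S) := by
  have hlen : 0 < S.length := List.length_pos_iff.mpr hne
  have hspec := pvBsLoop_spec S s 0 ((S.length : Int) - 1) none hs (by omega) (by omega)
    (by intro idx hidx hcase; exfalso; rcases hcase with h | h <;> omega)
    (by intro c h; cases h)
  constructor
  · intro c hc
    unfold bin_search_string at hc
    simp only [PySem.List.len_eq] at hc
    cases hres : pvBsLoop S s 0 ((S.length : Int) - 1) none with
    | none =>
      rw [hres] at hc
      change (none : Option Int) = some c at hc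
      simp at hc
    | some c0 =>
      rw [hres] at hc
      change (if PySem.List.pyGetD S c0 "" ≠ s then none else some c0) = some c at hc
      by_cases hne2 : PySem.List.pyGetD S c0 "" ≠ s
      · rw [if_pos hne2] at hc; simp at hc
      · rw [if_neg hne2] at hc
        have hcc : c0 = c := by injection hc
        rw [not_not] at hne2
        have hb := hspec.1 c0 hres
        have hmem : PySem.List.pyGetD S c0 "" ∈ S :=
          PySem.List.pyGetD_mem S "" (by unfold PySem.Raise.InRange; omega)
        rw [hne2] at hmem
        subst hcc
        exact ⟨hmem, hne2⟩
  · intro hnone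
    unfold bin_search_string at hnone
    simp only [PySem.List.len_eq] at hnone
    cases hres : pvBsLoop S s 0 ((S.length : Int) - 1) none with
    | none =>
      exact hspec.2 hres
    | some c0 =>
      rw [hres] at hnone
      change (if PySem.List.pyGetD S c0 "" ≠ s then none else some c0) = none at hnone
      by_cases hne2 : PySem.List.pyGetD S c0 "" ≠ s
      · exact (hspec.1 c0 hres).2.2 hne2
      · rw [if_neg hne2] at hnone; simp at hnone

-- ---- B side: the memoized recursion computes pvW ----

def pvMemoInv (W : List String) (t : String) (memo : PySem.Dict (Int × Int) Int) : Prop :=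
  ∀ p v, memo.get? p = some v → v = pvW W t p.1 p.2

theorem pvSolve_fold_aux (W : List String) (t : String) (fuel : Nat) (i j : Int)
    (hIH : ∀ (i' j' : Int) (memo : PySem.Dict (Int × Int) Int), (j' - i').toNat < fuel →
      pvMemoInv W t memo →
      (pvSolve t W fuel i' j' memo).1 = pvW W t i' j' ∧
        pvMemoInv W t (pvSolve t W fuel i' j' memo).2) :
    ∀ (ks : List Int),
      (∀ k ∈ ks, (k - i).toNat < fuel ∧ (j - (k + 1)).toNat < fuel) →
      ∀ (a : Int) (memo : PySem.Dict (Int × Int) Int), pvMemoInv W t memo →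
      (ks.foldl (fun (p : Int × PySem.Dict (Int × Int) Int) k =>
          let q1 := pvSolve t W fuel i k p.2
          let q2 := pvSolve t W fuel (k + 1) j q1.2
          (max p.1 (min q1.1 q2.1), q2.2)) (a, memo)).1
        = ks.foldl (fun a k => max a (min (pvW W t i k) (pvW W t (k + 1) j))) a ∧
      pvMemoInv W t ((ks.foldl (fun (p : Int × PySem.Dict (Int × Int) Int) k =>
          let q1 := pvSolve t W fuel i k p.2
          let q2 := pvSolve t W fuel (k + 1) j q1.2
          (max p.1 (min q1.1 q2.1), q2.2)) (a, memo)).2) := by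
  intro ks
  induction ks with
  | nil => intro _ a memo hm; exact ⟨rfl, hm⟩
  | cons k ks ih =>
    intro hb a memo hm
    have hk := hb k (List.mem_cons_self)
    have h1 := hIH i k memo hk.1 hm
    have h2 := hIH (k + 1) j _ hk.2 h1.2
    have hrest := ih (fun k' hk' => hb k' (List.mem_cons_of_mem _ hk'))
      (max a (min (pvW W t i k) (pvW W t (k + 1) j)))
      ((pvSolve t W fuel (k + 1) j (pvSolve t W fuel i k memo).2).2) h2.2
    simp only [List.foldl_cons]
    rw [h1.1, h2.1]
    exact hrest

theorem pvSolve_spec (W : List String) (t : String) :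
    ∀ (fuel : Nat) (i j : Int) (memo : PySem.Dict (Int × Int) Int),
      (j - i).toNat < fuel → pvMemoInv W t memo →
      (pvSolve t W fuel i j memo).1 = pvW W t i j ∧
        pvMemoInv W t (pvSolve t W fuel i j memo).2 := by
  intro fuel
  induction fuel with
  | zero => intro i j memo hf; omega
  | succ fuel ih =>
    intro i j memo hf hm
    rw [pvSolve]
    cases hg : memo.get? (i, j) with
    | some v =>
      simp only []
      exact ⟨hm (i, j) v hg, hm⟩
    | none =>
      simp only []
      have hIH : ∀ (i' j' : Int) (memo' : PySem.Dict (Int × Int) Int), (j' - i').toNat < fuel →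
          pvMemoInv W t memo' →
          (pvSolve t W fuel i' j' memo').1 = pvW W t i' j' ∧
            pvMemoInv W t (pvSolve t W fuel i' j' memo').2 := fun i' j' m' h1 h2 => ih i' j' m' h1 h2
      have hbounds : ∀ k ∈ PySem.List.pyRange (i + 1) (j - 1) 1,
          (k - i).toNat < fuel ∧ (j - (k + 1)).toNat < fuel := by
        intro k hkmem
        have := (PySem.List.mem_pyRange_one).mp hkmem
        omega
      have haux := pvSolve_fold_aux W t fuel i j hIH (PySem.List.pyRange (i + 1) (j - 1) 1) hbounds
        (if PySem.Set.contains W (PySem.Str.slice t (some i) (some (j + 1))) then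
          PySem.Str.len (PySem.Str.slice t (some i) (some (j + 1))) else -1) memo hm
      have hbase : (if PySem.Set.contains W (PySem.Str.slice t (some i) (some (j + 1))) then
            PySem.Str.len (PySem.Str.slice t (some i) (some (j + 1))) else (-1 : Int))
          = (if (PySem.Str.slice t (some i) (some (j + 1))) ∈ W then
            PySem.Str.len (PySem.Str.slice t (some i) (some (j + 1))) else (-1 : Int)) := by
        by_cases hmem : (PySem.Str.slice t (some i) (some (j + 1))) ∈ W
        · rw [if_pos ((PySem.Set.contains_iff W _).mpr hmem), if_pos hmem]
        · rw [if_neg (fun hb => hmem ((PySem.Set.contains_iff W _).mp hb)), if_neg hmem]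
      simp only [] at haux
      rw [hbase] at haux ⊢
      rw [← pvW_eq] at haux
      refine ⟨haux.1, ?_⟩
      intro p v hv
      rw [PySem.Dict.get?_insert] at hv
      by_cases hp : p = (i, j)
      · rw [if_pos hp] at hv
        have hvv : v = _ := (Option.some.injEq _ _).mp hv.symm
        subst hp
        rw [hvv]
        exact haux.1
      · rw [if_neg hp] at hv
        exact haux.2 p v hv

theorem alt_eq_pvW (S : List String) (t : String) :
    find_width_of_string_alt S t =
      pvW (PySem.List.sorted S (fun x => x) false) t 0 (PySem.Str.len t - 1) := by
  unfold find_width_of_string_alt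
  simp only []
  have hlen : (0 : Int) ≤ PySem.Str.len t := by rw [PySem.Str.len_eq]; positivity
  have h := pvSolve_spec (PySem.Set.ofList (PySem.List.sorted S (fun x => x) false)) t
    ((PySem.Str.len t).toNat + 1) 0 (PySem.Str.len t - 1) PySem.Dict.empty
    (by omega)
    (by intro p v hv; rw [PySem.Dict.get?_empty] at hv; simp at hv)
  rw [h.1]
  exact pvW_congr _ _ (fun x => PySem.Set.mem_ofList _ x) t 0 (PySem.Str.len t - 1)

-- ---- A side: the table fill computes pvW ----

def pvShape (F : List (List Int)) (n : Nat) : Prop :=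
  F.length = n ∧ ∀ row ∈ F, row.length = n

theorem pvRowConst (row : List Int) (hrow : ∀ x ∈ row, x = -1) (j : Int) :
    PySem.List.pyGetD row j (-1) = -1 := by
  by_cases h : PySem.Raise.InRange row.length j
  · exact hrow _ (PySem.List.pyGetD_mem row (-1) h)
  · exact PySem.List.pyGetD_of_none row j (-1) ((PySem.List.pyGet?_eq_none_iff row j).mpr h)

theorem pvShape_set2 (F : List (List Int)) (n : Nat) (hF : pvShape F n) (i j : Int)
    (hi0 : 0 ≤ i) (hi : i < (n : Int)) (hj0 : 0 ≤ j) (v : Int) : pvShape (pvSet2 F i j v) n := by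
  unfold pvSet2
  rw [PySem.List.pySetD_of_nonneg F _ hi0]
  constructor
  · rw [List.length_set]; exact hF.1
  · intro row hrow
    rcases List.mem_or_eq_of_mem_set hrow with h | h
    · exact hF.2 _ h
    · subst h
      rw [PySem.List.pySetD_of_nonneg _ _ hj0, List.length_set]
      exact hF.2 _ (PySem.List.pyGetD_mem F [] (by unfold PySem.Raise.InRange; rw [hF.1]; omega))

theorem pvGet2_set2 (F : List (List Int)) (n : Nat) (hF : pvShape F n) (i j : Int)
    (hi0 : 0 ≤ i) (hi : i < (n : Int)) (hj0 : 0 ≤ j) (hj : j < (n : Int)) (v : Int)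
    (i' j' : Int) (hi0' : 0 ≤ i') (hj0' : 0 ≤ j') :
    pvGet2 (pvSet2 F i j v) i' j' = if i' = i ∧ j' = j then v else pvGet2 F i' j' := by
  unfold pvGet2 pvSet2
  rw [PySem.List.pySetD_of_nonneg F _ hi0, PySem.List.pySetD_of_nonneg _ _ hj0]
  have hrowmem : PySem.List.pyGetD F i [] ∈ F := PySem.List.pyGetD_mem F []
    (by unfold PySem.Raise.InRange; rw [hF.1]; omega)
  have hrowlen : (PySem.List.pyGetD F i []).length = n := hF.2 _ hrowmem
  by_cases hii : i' = i
  · subst hii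
    rw [PySem.List.pyGetD_eq_getElem _ [] hi0' (by rw [List.length_set, hF.1]; exact hi)]
    rw [List.getElem_set, if_pos rfl]
    by_cases hjj : j' = j
    · subst hjj
      rw [PySem.List.pyGetD_eq_getElem _ (-1) hj0' (by rw [List.length_set, hrowlen]; exact hj)]
      rw [List.getElem_set, if_pos rfl, if_pos ⟨rfl, rfl⟩]
    · rw [if_neg (fun h => hjj h.2)]
      by_cases hjn' : j' < (n : Int)
      · rw [PySem.List.pyGetD_eq_getElem _ (-1) hj0' (by rw [List.length_set, hrowlen]; omega)]
        rw [List.getElem_set, if_neg (by omega)]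
        rw [PySem.List.pyGetD_eq_getElem _ (-1) hj0' (by rw [hrowlen]; omega)]
      · rw [PySem.List.pyGetD_of_none _ j' (-1) ((PySem.List.pyGet?_eq_none_iff _ j').mpr
          (by unfold PySem.Raise.InRange; rw [List.length_set, hrowlen]; omega))]
        rw [PySem.List.pyGetD_of_none _ j' (-1) ((PySem.List.pyGet?_eq_none_iff _ j').mpr
          (by unfold PySem.Raise.InRange; rw [hrowlen]; omega))]
  · rw [if_neg (fun h => hii h.1)]
    by_cases hin' : i' < (n : Int)
    · rw [PySem.List.pyGetD_eq_getElem _ [] hi0' (by rw [List.length_set, hF.1]; omega)]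
      rw [List.getElem_set, if_neg (by omega)]
      rw [PySem.List.pyGetD_eq_getElem F [] hi0' (by rw [hF.1]; omega)]
    · rw [PySem.List.pyGetD_of_none _ i' [] ((PySem.List.pyGet?_eq_none_iff _ i').mpr
        (by unfold PySem.Raise.InRange; rw [List.length_set, hF.1]; omega))]
      rw [PySem.List.pyGetD_of_none F i' [] ((PySem.List.pyGet?_eq_none_iff F i').mpr
        (by unfold PySem.Raise.InRange; rw [hF.1]; omega))]

def pvBodyA (M : List String) (t : String) (L : Int) (F : List (List Int)) (i : Int) :
    List (List Int) :=
  let j := i + L - 1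
  let F1 := match bin_search_string M (PySem.Str.slice t (some i) (some (j + 1))) with
    | some s_i => pvSet2 F i j (max (pvGet2 F i j) (PySem.Str.len (PySem.List.pyGetD M s_i "")))
    | none => F
  (PySem.List.pyRange (i + 1) (j - 1) 1).foldl (fun F k =>
    pvSet2 F i j (max (pvGet2 F i j) (min (pvGet2 F i k) (pvGet2 F (k + 1) j)))) F1

theorem pvKFold (n : Nat) (i j : Int) (hi0 : 0 ≤ i) (hij : i ≤ j) (hjn : j < (n : Int)) :
    ∀ (ks : List Int), (∀ k ∈ ks, i + 1 ≤ k ∧ k < j - 1) → ∀ (F1 : List (List Int)), pvShape F1 n →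
    pvShape (ks.foldl (fun F k =>
        pvSet2 F i j (max (pvGet2 F i j) (min (pvGet2 F i k) (pvGet2 F (k + 1) j)))) F1) n ∧
    pvGet2 (ks.foldl (fun F k =>
        pvSet2 F i j (max (pvGet2 F i j) (min (pvGet2 F i k) (pvGet2 F (k + 1) j)))) F1) i j
      = ks.foldl (fun a k => max a (min (pvGet2 F1 i k) (pvGet2 F1 (k + 1) j))) (pvGet2 F1 i j) ∧
    ∀ i' j', 0 ≤ i' → 0 ≤ j' → ¬(i' = i ∧ j' = j) →
      pvGet2 (ks.foldl (fun F k =>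
        pvSet2 F i j (max (pvGet2 F i j) (min (pvGet2 F i k) (pvGet2 F (k + 1) j)))) F1) i' j'
        = pvGet2 F1 i' j' := by
  intro ks
  induction ks with
  | nil => intro _ F1 hsh; exact ⟨hsh, rfl, fun _ _ _ _ _ => rfl⟩
  | cons k ks ih =>
    intro hb F1 hsh
    have hk := hb k (List.mem_cons_self)
    have hj0 : 0 ≤ j := by omega
    have hsh2 := pvShape_set2 F1 n hsh i j hi0 (by omega) hj0
      (max (pvGet2 F1 i j) (min (pvGet2 F1 i k) (pvGet2 F1 (k + 1) j)))
    have hrest := ih (fun k' hk' => hb k' (List.mem_cons_of_mem _ hk')) _ hsh2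
    simp only [List.foldl_cons]
    have hset := pvGet2_set2 F1 n hsh i j hi0 (by omega) hj0 hjn
      (max (pvGet2 F1 i j) (min (pvGet2 F1 i k) (pvGet2 F1 (k + 1) j)))
    refine ⟨hrest.1, ?_, ?_⟩
    · rw [hrest.2.1]
      rw [hset i j hi0 hj0, if_pos ⟨rfl, rfl⟩]
      apply PySem.List.foldl_congr_mem
      intro acc x hx
      have hxb := hb x (List.mem_cons_of_mem _ hx)
      rw [hset i x hi0 (by omega), if_neg (by omega),
        hset (x + 1) j (by omega) hj0, if_neg (by omega)]
    · intro i' j' hi0' hj0' hne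
      rw [hrest.2.2 i' j' hi0' hj0' hne, hset i' j' hi0' hj0', if_neg hne]

def pvInvA (M : List String) (t : String) (n : Nat) (L : Int) (F : List (List Int)) : Prop :=
  pvShape F n ∧ ∀ (i j : Int), 0 ≤ i → i < (n : Int) → 0 ≤ j → j < (n : Int) →
    pvGet2 F i j = if i ≤ j ∧ j - i + 1 ≤ L then pvW M t i j else -1

def pvInvRow (M : List String) (t : String) (n : Nat) (L I : Int) (F : List (List Int)) : Prop :=
  pvShape F n ∧ ∀ (i j : Int), 0 ≤ i → i < (n : Int) → 0 ≤ j → j < (n : Int) →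
    pvGet2 F i j = if (i ≤ j ∧ j - i + 1 ≤ L - 1) ∨ (j = i + L - 1 ∧ i < I) then pvW M t i j
      else -1

theorem pvInvA_to_row (M : List String) (t : String) (n : Nat) (L : Int)
    (F : List (List Int)) (h : pvInvA M t n (L - 1) F) : pvInvRow M t n L 0 F := by
  refine ⟨h.1, ?_⟩
  intro i j hi0 hin hj0 hjn
  rw [h.2 i j hi0 hin hj0 hjn]
  exact if_congr (by omega) rfl rfl

theorem pvRow_to_invA (M : List String) (t : String) (n : Nat) (L : Int) (hL : 1 ≤ L)
    (F : List (List Int)) (h : pvInvRow M t n L ((n : Int) - L + 1) F) : pvInvA M t n L F := by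
  refine ⟨h.1, ?_⟩
  intro i j hi0 hin hj0 hjn
  rw [h.2 i j hi0 hin hj0 hjn]
  exact if_congr (by omega) rfl rfl

theorem pvBodyA_step (M : List String) (hs : List.Pairwise (· ≤ ·) M) (hM : M ≠ [])
    (t : String) (n : Nat) (L I : Int) (hL : 1 ≤ L) (_hLn : L ≤ (n : Int))
    (hI0 : 0 ≤ I) (hIn : I < (n : Int) - L + 1) (F : List (List Int))
    (hinv : pvInvRow M t n L I F) : pvInvRow M t n L (I + 1) (pvBodyA M t L F I) := by
  obtain ⟨hFsh, hFval⟩ := hinv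
  unfold pvBodyA
  simp only []
  have hj0 : (0 : Int) ≤ I + L - 1 := by omega
  have hij : I ≤ I + L - 1 := by omega
  have hjn : I + L - 1 < (n : Int) := by omega
  have hstart : pvGet2 F I (I + L - 1) = -1 := by
    rw [hFval I (I + L - 1) hI0 (by omega) hj0 hjn, if_neg (by omega)]
  have hbs := bs_cases M (PySem.Str.slice t (some I) (some (I + L - 1 + 1))) hs hM
  set F1m := (match bin_search_string M (PySem.Str.slice t (some I) (some (I + L - 1 + 1))) with
    | some s_i => pvSet2 F I (I + L - 1)
        (max (pvGet2 F I (I + L - 1)) (PySem.Str.len (PySem.List.pyGetD M s_i "")))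
    | none => F) with hF1mdef
  have hF1 : pvShape F1m n ∧
      pvGet2 F1m I (I + L - 1)
        = (if (PySem.Str.slice t (some I) (some (I + L - 1 + 1))) ∈ M then
            PySem.Str.len (PySem.Str.slice t (some I) (some (I + L - 1 + 1))) else -1) ∧
      (∀ i' j', 0 ≤ i' → 0 ≤ j' → ¬(i' = I ∧ j' = I + L - 1) →
        pvGet2 F1m i' j' = pvGet2 F i' j') := by
    rw [hF1mdef]
    cases hres : bin_search_string M (PySem.Str.slice t (some I) (some (I + L - 1 + 1))) with
    | none =>
      refine ⟨hFsh, ?_, fun _ _ _ _ _ => rfl⟩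
      rw [hstart, if_neg (hbs.2 hres)]
    | some c =>
      obtain ⟨hmem, hval⟩ := hbs.1 c hres
      have hset := pvGet2_set2 F n hFsh I (I + L - 1) hI0 (by omega) hj0 hjn
        (max (pvGet2 F I (I + L - 1)) (PySem.Str.len (PySem.List.pyGetD M c "")))
      refine ⟨pvShape_set2 F n hFsh I (I + L - 1) hI0 (by omega) hj0 _, ?_, ?_⟩
      · rw [hset I (I + L - 1) hI0 hj0, if_pos ⟨rfl, rfl⟩, hstart, hval, if_pos hmem]
        have : (0 : Int) ≤ PySem.Str.len (PySem.Str.slice t (some I) (some (I + L - 1 + 1))) := by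
          rw [PySem.Str.len_eq]; positivity
        omega
      · intro i' j' hi0' hj0' hne
        rw [hset i' j' hi0' hj0', if_neg hne]
  have hkf := pvKFold n I (I + L - 1) hI0 hij hjn
    (PySem.List.pyRange (I + 1) (I + L - 1 - 1) 1)
    (fun k hk => by have := (PySem.List.mem_pyRange_one).mp hk; omega) F1m hF1.1
  refine ⟨hkf.1, ?_⟩
  intro i' j' hi0' hin' hj0' hjn'
  by_cases hme : i' = I ∧ j' = I + L - 1
  · obtain ⟨rfl, rfl⟩ := hme
    rw [hkf.2.1, if_pos (Or.inr ⟨rfl, by omega⟩), hF1.2.1]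
    have hcongr : (PySem.List.pyRange (i' + 1) (i' + L - 1 - 1) 1).foldl
        (fun a k => max a (min (pvGet2 F1m i' k) (pvGet2 F1m (k + 1) (i' + L - 1))))
        (if (PySem.Str.slice t (some i') (some (i' + L - 1 + 1))) ∈ M then
          PySem.Str.len (PySem.Str.slice t (some i') (some (i' + L - 1 + 1))) else -1)
        = (PySem.List.pyRange (i' + 1) (i' + L - 1 - 1) 1).foldl
        (fun a k => max a (min (pvW M t i' k) (pvW M t (k + 1) (i' + L - 1))))
        (if (PySem.Str.slice t (some i') (some (i' + L - 1 + 1))) ∈ M then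
          PySem.Str.len (PySem.Str.slice t (some i') (some (i' + L - 1 + 1))) else -1) := by
      apply PySem.List.foldl_congr_mem
      intro acc k hk
      have hkb := (PySem.List.mem_pyRange_one).mp hk
      rw [hF1.2.2 i' k hi0' (by omega) (by omega),
        hFval i' k hi0' hin' (by omega) (by omega), if_pos (by omega),
        hF1.2.2 (k + 1) (i' + L - 1) (by omega) hj0 (by omega),
        hFval (k + 1) (i' + L - 1) (by omega) (by omega) hj0 hjn, if_pos (by omega)]
    rw [hcongr, ← pvW_eq]
  · rw [hkf.2.2 i' j' hi0' hj0' hme, hF1.2.2 i' j' hi0' hj0' hme,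
      hFval i' j' hi0' hin' hj0' hjn']
    exact if_congr (by omega) rfl rfl

theorem pvRowFold (M : List String) (hs : List.Pairwise (· ≤ ·) M) (hM : M ≠ [])
    (t : String) (n : Nat) (L : Int) (hL : 1 ≤ L) (hLn : L ≤ (n : Int)) :
    ∀ (I : Int) (F : List (List Int)), 0 ≤ I → I ≤ (n : Int) - L + 1 → pvInvRow M t n L I F →
    pvInvRow M t n L ((n : Int) - L + 1)
      ((PySem.List.pyRange I ((n : Int) - L + 1) 1).foldl (pvBodyA M t L) F) := by
  intro I F hI0 hIle hinv
  by_cases hI : I < (n : Int) - L + 1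
  · rw [PySem.List.pyRange_one_cons hI, List.foldl_cons]
    exact pvRowFold M hs hM t n L hL hLn (I + 1) (pvBodyA M t L F I) (by omega) (by omega)
      (pvBodyA_step M hs hM t n L I hL hLn hI0 hI F hinv)
  · rw [PySem.List.pyRange_one_eq_nil (by omega), List.foldl_nil]
    have : I = (n : Int) - L + 1 := by omega
    rw [← this]
    exact hinv
termination_by I => ((n : Int) - L + 1 - I).toNat
decreasing_by omega

theorem pvOuterFold (M : List String) (hs : List.Pairwise (· ≤ ·) M) (hM : M ≠ [])
    (t : String) (n : Nat) :
    ∀ (L : Int) (F : List (List Int)), 1 ≤ L → L ≤ (n : Int) + 1 → pvInvA M t n (L - 1) F →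
    pvInvA M t n (n : Int)
      ((PySem.List.pyRange L ((n : Int) + 1) 1).foldl
        (fun F l => (PySem.List.pyRange 0 ((n : Int) - l + 1) 1).foldl (pvBodyA M t l) F) F) := by
  intro L F hL1 hLn hinv
  by_cases hL : L < (n : Int) + 1
  · rw [PySem.List.pyRange_one_cons hL, List.foldl_cons]
    apply pvOuterFold M hs hM t n (L + 1) _ (by omega) (by omega)
    have hrow := pvRowFold M hs hM t n L hL1 (by omega) 0 F (by omega) (by omega)
      (pvInvA_to_row M t n L F hinv)
    have := pvRow_to_invA M t n L hL1 _ hrow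
    have hLL : L + 1 - 1 = L := by omega
    rw [hLL]
    exact this
  · rw [PySem.List.pyRange_one_eq_nil (by omega), List.foldl_nil]
    have : L - 1 = (n : Int) := by omega
    rw [← this]
    exact hinv
termination_by L => ((n : Int) + 1 - L).toNat
decreasing_by omega

theorem pvF0_get2 (b : Int) (i j : Int) :
    pvGet2 ((PySem.List.pyRange 0 b 1).map
      (fun _ => (PySem.List.pyRange 0 b 1).map (fun _ => (-1 : Int)))) i j = -1 := by
  unfold pvGet2
  by_cases h : PySem.Raise.InRange ((PySem.List.pyRange 0 b 1).map
      (fun _ => (PySem.List.pyRange 0 b 1).map (fun _ => (-1 : Int)))).length i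
  · have hrow := PySem.List.pyGetD_mem ((PySem.List.pyRange 0 b 1).map
      (fun _ => (PySem.List.pyRange 0 b 1).map (fun _ => (-1 : Int)))) [] h
    obtain ⟨_, _, hrow_eq⟩ := List.mem_map.mp hrow
    apply pvRowConst
    intro x hx
    rw [← hrow_eq] at hx
    obtain ⟨_, _, hx_eq⟩ := List.mem_map.mp hx
    exact hx_eq.symm
  · rw [PySem.List.pyGetD_of_none _ i [] ((PySem.List.pyGet?_eq_none_iff _ i).mpr h)]
    exact pvRowConst [] (by intro x hx; cases hx) j

theorem pvF0_shape (b : Int) (hb : 0 ≤ b) :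
    pvShape ((PySem.List.pyRange 0 b 1).map
      (fun _ => (PySem.List.pyRange 0 b 1).map (fun _ => (-1 : Int)))) b.toNat := by
  constructor
  · rw [List.length_map, PySem.List.length_pyRange_one]; omega
  · intro row hrow
    obtain ⟨_, _, hrow_eq⟩ := List.mem_map.mp hrow
    rw [← hrow_eq, List.length_map, PySem.List.length_pyRange_one]; omega

theorem pvA_eq (S : List String) (t : String) (hpre : Pre_find_width_of_string S t) :
    find_width_of_string S t =
      pvW (PySem.List.sorted S (fun x => x) false) t 0 (PySem.Str.len t - 1) := by
  have hs : List.Pairwise (· ≤ ·) (PySem.List.sorted S (fun x => x) false) :=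
    PySem.List.sorted_pairwise S (fun x => x)
  have hM : PySem.List.sorted S (fun x => x) false ≠ [] := by
    intro h
    exact hpre.1 ((PySem.List.sorted_eq_nil_iff S (fun x => x) false).mp h)
  have htne : t.toList ≠ [] := fun h => hpre.2 (String.toList_eq_nil_iff.mp h)
  have hn1 : 1 ≤ t.toList.length := by
    cases hl : t.toList with
    | nil => exact absurd hl htne
    | cons a l => simp
  unfold find_width_of_string
  simp only []
  rw [show PySem.Str.len t = ((t.toList.length : Nat) : Int) from PySem.Str.len_eq t]
  set M := PySem.List.sorted S (fun x => x) false with hMdef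
  set n : Nat := t.toList.length with hndef
  have hF0 : pvInvA M t n 0 ((PySem.List.pyRange 0 (n : Int) 1).map
      (fun _ => (PySem.List.pyRange 0 (n : Int) 1).map (fun _ => (-1 : Int)))) := by
    constructor
    · have := pvF0_shape (n : Int) (by omega)
      rwa [Int.toNat_natCast] at this
    · intro i j hi0 hin hj0 hjn
      rw [pvF0_get2, if_neg (by omega)]
  have hfin := pvOuterFold M hs hM t n 1 _ (by omega) (by omega) (by rw [show (1 : Int) - 1 = 0 from rfl]; exact hF0)
  -- the port's fold is definitionally the pvBodyA fold
  have hfin' : pvInvA M t n (n : Int)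
      ((PySem.List.pyRange 1 ((n : Int) + 1) 1).foldl
        (fun F l => (PySem.List.pyRange 0 ((n : Int) - l + 1) 1).foldl
          (fun F i =>
            (PySem.List.pyRange (i + 1) (i + l - 1 - 1) 1).foldl
              (fun F k => pvSet2 F i (i + l - 1)
                (max (pvGet2 F i (i + l - 1)) (min (pvGet2 F i k) (pvGet2 F (k + 1) (i + l - 1)))))
              (match bin_search_string M (PySem.Str.slice t (some i) (some (i + l - 1 + 1))) with
                | some s_i => pvSet2 F i (i + l - 1)
                    (max (pvGet2 F i (i + l - 1)) (PySem.Str.len (PySem.List.pyGetD M s_i "")))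
                | none => F)) F) _) := hfin
  set G := (PySem.List.pyRange 1 ((n : Int) + 1) 1).foldl
        (fun F l => (PySem.List.pyRange 0 ((n : Int) - l + 1) 1).foldl
          (fun F i =>
            (PySem.List.pyRange (i + 1) (i + l - 1 - 1) 1).foldl
              (fun F k => pvSet2 F i (i + l - 1)
                (max (pvGet2 F i (i + l - 1)) (min (pvGet2 F i k) (pvGet2 F (k + 1) (i + l - 1)))))
              (match bin_search_string M (PySem.Str.slice t (some i) (some (i + l - 1 + 1))) with
                | some s_i => pvSet2 F i (i + l - 1)
                    (max (pvGet2 F i (i + l - 1)) (PySem.Str.len (PySem.List.pyGetD M s_i "")))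
                | none => F)) F)
        ((PySem.List.pyRange 0 (n : Int) 1).map
          (fun _ => (PySem.List.pyRange 0 (n : Int) 1).map (fun _ => (-1 : Int)))) with hGdef
  -- final read F[0][-1] = F[0][n-1]
  have hrow0 : PySem.List.pyGetD G 0 [] ∈ G := PySem.List.pyGetD_mem G []
    (by unfold PySem.Raise.InRange; rw [hfin'.1.1]; omega)
  have hrowlen : (PySem.List.pyGetD G 0 []).length = n := hfin'.1.2 _ hrow0
  have hrowne : PySem.List.pyGetD G 0 [] ≠ [] := by
    intro h; rw [h] at hrowlen; simp at hrowlen; omega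
  rw [PySem.List.pyGetD_neg_one _ (0 : Int) hrowne]
  rw [List.getLast_eq_getElem]
  have hlast : (PySem.List.pyGetD G 0 [])[(PySem.List.pyGetD G 0 []).length - 1]
      = pvGet2 G 0 ((n : Int) - 1) := by
    unfold pvGet2
    rw [PySem.List.pyGetD_eq_getElem _ (-1) (by omega) (by rw [hrowlen]; omega)]
    congr 1
    omega
  rw [hlast, hfin'.2 0 ((n : Int) - 1) (by omega) (by omega) (by omega) (by omega),
    if_pos (by omega)]
-- ===== VERDICT (by name: the statement is the Claim_ definition above) =====
theorem find_width_of_string_spec : Claim_equal_find_width_of_string := by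
  intro S t _hdom hpre
  unfold Spec_find_width_of_string
  rw [pvA_eq S t hpre, alt_eq_pvW S t]
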